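-- pv_equiv track=rewrite | github.com/Adamssss/projectEuler | Problem 001-150 Python/pb106.py | undsub
-- ===== SOURCE A (Python) =====
-- def quickSort(L, low, high):
--     i = low
--     j = high
--     if i >= j:
--         return L
--     key = L[i]
--     while i < j:
--         while i < j and L[j] >= key:
--             j = j-1
--         L[i] = L[j]
--         while i < j and L[i] <= key:
--             i = i+1
--         L[j] = L[i]
--     L[i] = key
--     quickSort(L, low, i-1)
--     quickSort(L, j+1, high)
--     return L
--
-- def undsub(setp):
--     B = setp[0]
--     C = setp[1]
--     lb = len(B)
--     lc = len(C)
--     if lb != lc: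
--         return False
--     if lb == 1:
--         return False
--     count = 0
--     copy = quickSort(C[:],0,lc-1)
--     for i in range(lb):
--         temp = B[i]
--         for j in copy:
--             if j > temp:
--                 copy.remove(j)
--                 count += 1
--                 break
--     if count == lb:
--         return False
--     count = 0
--     copy = quickSort(B[:],0,lb-1)
--     for i in range(lc):
--         temp = C[i]
--         for j in copy:
--             if j > temp:
--                 copy.remove(j)
--                 count += 1
--                 break
--     if count == lc:
--         return False
--     return True
-- ===== SOURCE B (Python) =====
-- def undsub(setp):
--     B = setp[0]
--     C = setp[1]
--     if len(B) != len(C) or len(B) == 1: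
--         return False
--     sb = sorted(B)
--     sc = sorted(C)
--     c_dominates_b = all(u > v for u, v in zip(sc, sb))
--     b_dominates_c = all(u > v for u, v in zip(sb, sc))
--     return not c_dominates_b and not b_dominates_c
-- ===== Notes on version B (the rewrite author's own statement) =====
-- stated objective: faster
-- what changed: replaces the hand-written in-place quicksort plus the O(n^2) greedy scan-and-remove matching loops by sorting both lists once and comparing them pointwise (sorted(C)[k] > sorted(B)[k] for all k, and vice versa), which is provably the same test
import Mathlib
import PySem

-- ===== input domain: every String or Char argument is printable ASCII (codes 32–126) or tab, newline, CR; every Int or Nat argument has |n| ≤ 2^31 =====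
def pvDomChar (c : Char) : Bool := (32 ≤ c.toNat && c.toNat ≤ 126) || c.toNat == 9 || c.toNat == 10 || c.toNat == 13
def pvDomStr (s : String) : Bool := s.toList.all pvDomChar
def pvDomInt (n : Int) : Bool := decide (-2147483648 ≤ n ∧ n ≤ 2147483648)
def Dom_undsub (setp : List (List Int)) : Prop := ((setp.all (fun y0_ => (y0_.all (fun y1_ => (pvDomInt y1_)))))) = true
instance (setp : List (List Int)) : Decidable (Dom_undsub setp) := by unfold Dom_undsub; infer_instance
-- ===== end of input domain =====

-- B replaces A's hand-written quicksort and O(n^2) greedy scan-and-remove matching by sorting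
-- both lists once and comparing them pointwise; return value only (A also sorts private copies).

-- ===== PORT A =====
-- inner `while i < j and L[j] >= key: j = j-1`  (fueled; fuel (j-i).toNat is exactly enough)
def qsJ : Nat → List Int → Int → Int → Int → Int
  | 0, _, _, j, _ => j
  | fuel+1, L, i, j, key =>
    if i < j ∧ key ≤ PySem.List.pyGetD L j 0 then qsJ fuel L i (j-1) key else j

-- inner `while i < j and L[i] <= key: i = i+1`
def qsI : Nat → List Int → Int → Int → Int → Int
  | 0, _, i, _, _ => i
  | fuel+1, L, i, j, key =>
    if i < j ∧ PySem.List.pyGetD L i 0 ≤ key then qsI fuel L (i+1) j key else i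

-- outer `while i < j: …` of quickSort; returns (L, i, j) at loop exit
def qsOuter : Nat → List Int → Int → Int → Int → List Int × Int × Int
  | 0, L, i, j, _ => (L, i, j)
  | fuel+1, L, i, j, key =>
    if i < j then
      let j' := qsJ (j - i).toNat L i j key
      let L1 := L.set i.toNat (PySem.List.pyGetD L j' 0)
      let i' := qsI (j' - i).toNat L1 i j' key
      let L2 := L1.set j'.toNat (PySem.List.pyGetD L1 i' 0)
      qsOuter fuel L2 i' j' key
    else (L, i, j)

-- quickSort(L, low, high) (in-place index quicksort, ported over immutable lists)
def qs : Nat → List Int → Int → Int → List Int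
  | 0, L, _, _ => L
  | fuel+1, L, low, high =>
    if low ≥ high then L
    else
      let key := PySem.List.pyGetD L low 0
      let r := qsOuter (high - low).toNat L low high key
      let L'' := r.1.set r.2.1.toNat key
      qs fuel (qs fuel L'' low (r.2.1 - 1)) (r.2.2 + 1) high

-- `for i in range(lb): temp = B[i]; for j in copy: if j > temp: copy.remove(j); count += 1; break`
def aLoop : List Int → List Int → Int → Int
  | [], _, count => count
  | b :: bs, copy, count =>
    match copy.find? (fun j => decide (b < j)) with
    | some j => aLoop bs ((PySem.List.remove? copy j).getD copy) (count + 1)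
    | none => aLoop bs copy count

def undsub (setp : List (List Int)) : Bool :=
  match PySem.List.pyGet? setp 0, PySem.List.pyGet? setp 1 with
  | some B, some C =>
    if (B.length : Int) ≠ (C.length : Int) then false
    else if (B.length : Int) = 1 then false
    else
      let copy := qs C.length C 0 ((C.length : Int) - 1)
      let count := aLoop B copy 0
      if count = (B.length : Int) then false
      else
        let copy2 := qs B.length B 0 ((B.length : Int) - 1)
        let count2 := aLoop C copy2 0
        if count2 = (C.length : Int) then false else true
  | _, _ => false   -- setp[0]/setp[1] would raise IndexError: outside Pre_

-- ===== PORT B =====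
-- all(u > v for u, v in zip(x, y))
def domBy (x y : List Int) : Bool := (x.zip y).all (fun p => decide (p.2 < p.1))

def undsub_alt (setp : List (List Int)) : Bool :=
  let B := (PySem.List.pyGet? setp 0).getD []   -- setp[0]; outside Pre_ Python raises IndexError
  let C := (PySem.List.pyGet? setp 1).getD []
  if B.length ≠ C.length || B.length == 1 then false
  else
    let sb := PySem.List.sorted B (fun x => x) false
    let sc := PySem.List.sorted C (fun x => x) false
    !(domBy sc sb) && !(domBy sb sc)

-- ===== PRECONDITION & SPEC =====
-- Python A (and B) raises IndexError on `setp[0]`/`setp[1]` when setp has fewer than 2 elements.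
def Pre_undsub (setp : List (List Int)) : Prop := 2 ≤ setp.length
instance (setp : List (List Int)) : Decidable (Pre_undsub setp) := by unfold Pre_undsub; infer_instance
def pvWitness_undsub : List (List Int) := [[1, 3], [2, 5]]

def Spec_undsub (setp : List (List Int)) (out : Bool) : Prop := out = undsub_alt setp
instance (setp : List (List Int)) (out : Bool) : Decidable (Spec_undsub setp out) := by unfold Spec_undsub; infer_instance

-- ===== CLAIM (what is proved, stated in full; the proofs are below) =====
def Claim_equal_undsub : Prop := ∀ (setp : List (List Int)), Dom_undsub setp → Pre_undsub setp → Spec_undsub setp (undsub setp)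

-- ===== LEMMAS AND PROOFS =====

-- list segment [a, b) (half-open, Nat indices)
def segL (L : List Int) (a b : Nat) : List Int := (L.drop a).take (b - a)

-- boolean "every element of bs gets greedily matched against copy"
def allM : List Int → List Int → Bool
  | [], _ => true
  | b :: bs, copy =>
    match copy.find? (fun j => decide (b < j)) with
    | some c => allM bs (copy.erase c)
    | none => false

-- getD/set/take/drop index toolkit
theorem getD_set_ne (M : List Int) (p k : Nat) (v : Int) (h : k ≠ p) :
    (M.set p v).getD k 0 = M.getD k 0 := by
  simp [List.getD_eq_getElem?_getD, List.getElem?_set_ne (Ne.symm h)]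

theorem getD_set_self (M : List Int) (p : Nat) (v : Int) (h : p < M.length) :
    (M.set p v).getD p 0 = v := by
  simp [List.getD_eq_getElem?_getD, List.getElem?_set_self h]

theorem set_getD_self (M : List Int) (p : Nat) (h : p < M.length) :
    M.set p (M.getD p 0) = M := by
  rw [List.getD_eq_getElem _ _ h, List.set_getElem_self]

theorem take_set_of_le (M : List Int) (p n : Nat) (v : Int) (h : n ≤ p) :
    (M.set p v).take n = M.take n := by
  apply List.ext_getElem (by simp)
  intro i h1 h2
  simp only [List.getElem_take]
  rw [List.getElem_set_ne (by simp at h1; omega)]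

theorem drop_set_of_lt (M : List Int) (p n : Nat) (v : Int) (h : p < n) :
    (M.set p v).drop n = M.drop n := by
  apply List.ext_getElem (by simp)
  intro i h1 h2
  simp only [List.getElem_drop]
  rw [List.getElem_set_ne (by omega)]

theorem take_append_gen : ∀ (l1 l2 : List Int) (n : Nat),
    (l1 ++ l2).take n = l1.take n ++ l2.take (n - l1.length) := by
  intro l1
  induction l1 with
  | nil => intro l2 n; simp
  | cons x l1 ih =>
    intro l2 n
    cases n with
    | zero => simp
    | succ n => simp [List.take_succ_cons, ih l2 n, Nat.succ_sub_succ]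

theorem drop_append_gen : ∀ (l1 l2 : List Int) (n : Nat),
    (l1 ++ l2).drop n = l1.drop n ++ l2.drop (n - l1.length) := by
  intro l1
  induction l1 with
  | nil => intro l2 n; simp
  | cons x l1 ih =>
    intro l2 n
    cases n with
    | zero => simp
    | succ n => simp [ih l2 n, Nat.succ_sub_succ]

-- segment toolkit
theorem segL_len (L : List Int) (a b : Nat) : (segL L a b).length = min (b - a) (L.length - a) := by
  simp [segL]

theorem segL_nil (L : List Int) (a : Nat) : segL L a a = [] := by simp [segL]

theorem segL_split (L : List Int) (a m b : Nat) (h1 : a ≤ m) (h2 : m ≤ b) :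
    segL L a b = segL L a m ++ segL L m b := by
  unfold segL
  rw [show b - a = (m - a) + (b - m) by omega, List.take_add, List.drop_drop,
    show a + (m - a) = m by omega]

theorem segL_head (L : List Int) (a b : Nat) (hab : a < b) (ha : a < L.length) :
    segL L a b = L[a] :: segL L (a+1) b := by
  unfold segL
  rw [List.drop_eq_getElem_cons ha]
  rw [show b - a = (b - (a+1)) + 1 by omega, List.take_succ_cons]

theorem segL_dec (L : List Int) (a m b : Nat) (h1 : a ≤ m) (h2 : m < b) (hm : m < L.length) :
    segL L a b = segL L a m ++ L[m] :: segL L (m+1) b := by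
  rw [segL_split L a m b h1 (by omega), segL_head L m b h2 hm]

theorem segL_getD_mem (L : List Int) (a b : Nat) (x : Int) (h : x ∈ segL L a b) :
    ∃ k, a ≤ k ∧ k < b ∧ k < L.length ∧ L.getD k 0 = x := by
  obtain ⟨i, hi, hx⟩ := List.getElem_of_mem h
  have hlen : i < min (b - a) (L.length - a) := by rw [← segL_len]; exact hi
  refine ⟨a + i, by omega, by omega, by omega, ?_⟩
  rw [← hx]
  unfold segL
  rw [List.getElem_take, List.getElem_drop, List.getD_eq_getElem _ _ (by omega)]

theorem segL_set_out (L : List Int) (k a b : Nat) (v : Int) (h : k < a ∨ b ≤ k) :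
    segL (L.set k v) a b = segL L a b := by
  apply List.ext_getElem (by simp [segL_len])
  intro i h1 h2
  have hlen : i < min (b - a) (L.length - a) := by rw [← segL_len]; exact h2
  unfold segL
  simp only [List.getElem_take, List.getElem_drop]
  rw [List.getElem_set_ne (by omega)]

theorem segL_set_in (L : List Int) (k a b : Nat) (v : Int) (ha : a ≤ k) (hk : k < b)
    (hl : k < L.length) :
    segL (L.set k v) a b = segL L a k ++ v :: segL L (k+1) b := by
  rw [segL_dec (L.set k v) a k b ha hk (by simpa using hl)]
  rw [List.getElem_set_self]
  rw [segL_set_out L k a k v (Or.inr le_rfl), segL_set_out L k (k+1) b v (Or.inl (by omega))]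

-- the two-position "hole swap" permutation behind one round of the partition loop
theorem seg_swap_perm (L : List Int) (lo hi2 i i' j' : Nat) (key : Int)
    (h1 : lo ≤ i) (h2 : i < i') (h3 : i' ≤ j') (h4 : j' < hi2) (h5 : hi2 ≤ L.length) :
    (segL (((L.set i (L.getD j' 0)).set j' ((L.set i (L.getD j' 0)).getD i' 0)).set i' key) lo hi2).Perm
      (segL (L.set i key) lo hi2) := by
  have hjl : j' < L.length := by omega
  have hil : i < L.length := by omega
  have hi'l : i' < L.length := by omega
  rcases eq_or_lt_of_le h3 with he | hlt
  · -- i' = j' : the two inner writes collapse to one position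
    subst he
    have hw : (L.set i (L.getD i' 0)).getD i' 0 = L.getD i' 0 := getD_set_ne _ _ _ _ (by omega)
    rw [hw, List.set_set]
    rw [segL_set_in _ i' lo hi2 key (by omega) h4 (by simpa using hi'l)]
    rw [segL_set_out L i (i'+1) hi2 _ (Or.inl (by omega))]
    rw [segL_set_in L i lo i' _ h1 h2 hil]
    rw [segL_set_in L i lo hi2 key h1 (by omega) hil]
    rw [segL_dec L (i+1) i' hi2 (by omega) h4 hi'l]
    rw [List.getD_eq_getElem L 0 hi'l]
    apply List.perm_iff_count.mpr
    intro x
    simp only [List.count_append, List.count_cons]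
    ring
  · -- i' < j' : three distinct positions
    have hw : (L.set i (L.getD j' 0)).getD i' 0 = L.getD i' 0 := getD_set_ne _ _ _ _ (by omega)
    rw [hw]
    rw [segL_set_in _ i' lo hi2 key (by omega) (by omega) (by simpa using hi'l)]
    rw [segL_set_out (L.set i (L.getD j' 0)) j' lo i' _ (Or.inr (by omega))]
    rw [segL_set_in L i lo i' _ h1 h2 hil]
    rw [segL_set_in (L.set i (L.getD j' 0)) j' (i'+1) hi2 _ (by omega) h4 (by simpa using hjl)]
    rw [segL_set_out L i (i'+1) j' _ (Or.inl (by omega))]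
    rw [segL_set_out L i (j'+1) hi2 _ (Or.inl (by omega))]
    rw [segL_set_in L i lo hi2 key h1 (by omega) hil]
    rw [segL_dec L (i+1) i' hi2 (by omega) (by omega) hi'l]
    rw [segL_dec L (i'+1) j' hi2 (by omega) h4 hjl]
    rw [List.getD_eq_getElem L 0 hi'l, List.getD_eq_getElem L 0 hjl]
    apply List.perm_iff_count.mpr
    intro x
    simp only [List.count_append, List.count_cons]
    ring

theorem qsJ_spec (fuel : Nat) : ∀ (L : List Int) (i j : Nat) (key : Int), i ≤ j → j - i ≤ fuel →
    ∃ j' : Nat, qsJ fuel L (i : Int) (j : Int) key = (j' : Int) ∧ i ≤ j' ∧ j' ≤ j ∧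
      (∀ k : Nat, j' < k → k ≤ j → key ≤ L.getD k 0) ∧ (i < j' → L.getD j' 0 < key) := by
  induction fuel with
  | zero =>
    intro L i j key hij hf
    have hji : i = j := by omega
    subst hji
    exact ⟨i, rfl, le_rfl, le_rfl, by intro k h1 h2; omega, by omega⟩
  | succ fuel ih =>
    intro L i j key hij hf
    rw [qsJ]
    split_ifs with h
    · have hij' : i < j := by exact_mod_cast h.1
      rw [show (j : Int) - 1 = ((j - 1 : Nat) : Int) by omega]
      obtain ⟨j', e, h1, h2, h3, h4⟩ := ih L i (j-1) key (by omega) (by omega)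
      refine ⟨j', e, h1, by omega, ?_, h4⟩
      intro k hk1 hk2
      rcases Nat.lt_or_ge k j with hk | hk
      · exact h3 k hk1 (by omega)
      · have hkj : k = j := by omega
        subst hkj
        have h2' := h.2
        simpa using h2'
    · refine ⟨j, rfl, hij, le_rfl, by intro k h1 h2; omega, ?_⟩
      intro hlt
      push_neg at h
      have h2 := h (by exact_mod_cast hlt)
      simpa using h2

theorem qsI_spec (fuel : Nat) : ∀ (L : List Int) (i j : Nat) (key : Int), i ≤ j → j - i ≤ fuel →
    ∃ i' : Nat, qsI fuel L (i : Int) (j : Int) key = (i' : Int) ∧ i ≤ i' ∧ i' ≤ j ∧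
      (∀ k : Nat, i ≤ k → k < i' → L.getD k 0 ≤ key) ∧ (i' < j → key < L.getD i' 0) ∧
      (i < j → L.getD i 0 ≤ key → i < i') := by
  induction fuel with
  | zero =>
    intro L i j key hij hf
    have hji : i = j := by omega
    subst hji
    exact ⟨i, rfl, le_rfl, le_rfl, by intro k h1 h2; omega, by omega, by omega⟩
  | succ fuel ih =>
    intro L i j key hij hf
    rw [qsI]
    split_ifs with h
    · have hij' : i < j := by exact_mod_cast h.1
      rw [show (i : Int) + 1 = ((i + 1 : Nat) : Int) by omega]
      obtain ⟨i', e, h1, h2, h3, h4, h5⟩ := ih L (i+1) j key (by omega) (by omega)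
      refine ⟨i', e, by omega, h2, ?_, h4, by omega⟩
      intro k hk1 hk2
      rcases Nat.lt_or_ge i k with hk | hk
      · exact h3 k (by omega) hk2
      · have hki : k = i := by omega
        subst hki
        have h2' := h.2
        simpa using h2'
    · refine ⟨i, rfl, le_rfl, hij, by intro k h1 h2; omega, ?_, ?_⟩
      · intro hlt
        push_neg at h
        have h2 := h (by exact_mod_cast hlt)
        simpa using h2
      · intro hlt hle
        push_neg at h
        have h2 := h (by exact_mod_cast hlt)
        rw [PySem.List.pyGetD_natCast] at h2
        omega

theorem qsOuter_self (fuel : Nat) (L : List Int) (x key : Int) :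
    qsOuter fuel L x x key = (L, x, x) := by
  cases fuel <;> simp [qsOuter]

theorem qsOuter_spec (fuel : Nat) : ∀ (L : List Int) (lo i j hi : Nat) (key : Int),
    lo ≤ i → i ≤ j → j ≤ hi → hi < L.length → j - i ≤ fuel →
    (∀ k, lo ≤ k → k < i → L.getD k 0 ≤ key) →
    (∀ k, j < k → k ≤ hi → key ≤ L.getD k 0) →
    ∃ (L' : List Int) (i' : Nat), qsOuter fuel L (i : Int) (j : Int) key = (L', (i' : Int), (i' : Int)) ∧
      i ≤ i' ∧ i' ≤ j ∧ L'.length = L.length ∧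
      (∀ k, lo ≤ k → k < i' → L'.getD k 0 ≤ key) ∧
      (∀ k, i' < k → k ≤ hi → key ≤ L'.getD k 0) ∧
      (segL (L'.set i' key) lo (hi+1)).Perm (segL (L.set i key) lo (hi+1)) ∧
      L'.take lo = L.take lo ∧ L'.drop (hi+1) = L.drop (hi+1) := by
  induction fuel with
  | zero =>
    intro L lo i j hi key hloi hij hjhi hlen hf hH1 hH2
    have hji : i = j := by omega
    subst hji
    simp only [qsOuter]
    exact ⟨L, i, rfl, le_rfl, le_rfl, rfl, hH1, hH2, List.Perm.refl _, rfl, rfl⟩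
  | succ fuel ih =>
    intro L lo i j hi key hloi hij hjhi hlen hf hH1 hH2
    by_cases hij' : i < j
    · simp only [qsOuter]
      rw [if_pos (show (i : Int) < (j : Int) by exact_mod_cast hij')]
      rw [show ((j : Int) - (i : Int)).toNat = j - i by omega]
      obtain ⟨j', ej, hj1, hj2, hj3, hj4⟩ := qsJ_spec (j - i) L i j key hij le_rfl
      rw [ej]
      have hjlen : j' < L.length := by omega
      have hilen : i < L.length := by omega
      simp only [PySem.List.pyGetD_natCast, Int.toNat_natCast]
      by_cases hij'' : i < j'
      · -- real partition round
        have hukey : L.getD j' 0 < key := hj4 hij''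
        rw [show ((j' : Int) - (i : Int)).toNat = j' - i by omega]
        obtain ⟨i', ei, hi1, hi2, hi3, hi4, hi5⟩ :=
          qsI_spec (j' - i) (L.set i (L.getD j' 0)) i j' key (le_of_lt hij'') le_rfl
        rw [ei]
        simp only [PySem.List.pyGetD_natCast, Int.toNat_natCast]
        have hii' : i < i' := by
          apply hi5 hij''
          rw [getD_set_self _ _ _ hilen]
          omega
        have hi'len : i' < L.length := by omega
        obtain ⟨L', i'', e2, c1, c2, clen, cH1, cH2, cperm, ctake, cdrop⟩ :=
          ih ((L.set i (L.getD j' 0)).set j' ((L.set i (L.getD j' 0)).getD i' 0)) lo i' j' hi key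
            (by omega) hi2 (by omega) (by simp; omega) (by omega)
            (by
              intro k hk1 hk2
              rw [getD_set_ne _ _ _ _ (by omega)]
              rcases Nat.lt_or_ge k i with hk | hk
              · rw [getD_set_ne _ _ _ _ (by omega)]
                exact hH1 k hk1 hk
              · exact hi3 k hk hk2)
            (by
              intro k hk1 hk2
              rw [getD_set_ne _ _ _ _ (by omega), getD_set_ne _ _ _ _ (by omega)]
              by_cases hk : k ≤ j
              · exact hj3 k (by omega) hk
              · exact hH2 k (by omega) hk2)
        refine ⟨L', i'', e2, by omega, by omega, by rw [clen]; simp, cH1, cH2, ?_, ?_, ?_⟩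
        · apply cperm.trans
          exact seg_swap_perm L lo (hi+1) i i' j' key hloi hii' hi2 (by omega) (by omega)
        · rw [ctake, take_set_of_le _ _ _ _ (by omega), take_set_of_le _ _ _ _ hloi]
        · rw [cdrop, drop_set_of_lt _ _ _ _ (by omega), drop_set_of_lt _ _ _ _ (by omega)]
      · -- the scan already met i (j' = i): all writes are no-ops and the loop exits
        have hji' : j' = i := by omega
        subst hji'
        rw [set_getD_self L j' hjlen]
        rw [show ((j' : Int) - (j' : Int)).toNat = 0 by omega]
        simp only [qsI]
        simp only [PySem.List.pyGetD_natCast, Int.toNat_natCast]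
        rw [set_getD_self L j' hjlen]
        rw [qsOuter_self]
        refine ⟨L, j', rfl, le_rfl, by omega, rfl, hH1, ?_, List.Perm.refl _, rfl, rfl⟩
        intro k hk1 hk2
        by_cases hk : k ≤ j
        · exact hj3 k hk1 hk
        · exact hH2 k (by omega) hk2
    · -- loop guard fails at entry: i = j
      have hji : i = j := by omega
      subst hji
      simp only [qsOuter]
      rw [if_neg (show ¬ ((i : Int) < (i : Int)) by omega)]
      exact ⟨L, i, rfl, le_rfl, le_rfl, rfl, hH1, hH2, List.Perm.refl _, rfl, rfl⟩

theorem qs_spec (fuel : Nat) : ∀ (L : List Int) (lo : Nat) (hi : Int),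
    (lo : Int) ≤ hi + 1 → hi < (L.length : Int) → (hi + 1 - (lo : Int)).toNat ≤ fuel →
    ∃ M : List Int, qs fuel L (lo : Int) hi = L.take lo ++ M ++ L.drop (hi+1).toNat ∧
      M.Perm (segL L lo (hi+1).toNat) ∧ M.Pairwise (· ≤ ·) ∧
      (qs fuel L (lo : Int) hi).length = L.length := by
  induction fuel with
  | zero =>
    intro L lo hi h1 h2 h3
    have hempty : (hi + 1).toNat = lo := by omega
    simp only [qs, hempty]
    refine ⟨[], ?_, by simp [segL], List.Pairwise.nil, by trivial⟩
    simp [List.take_append_drop]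
  | succ fuel ih =>
    intro L lo hi h1 h2 h3
    simp only [qs]
    by_cases hc : (lo : Int) ≥ hi
    · rw [if_pos hc]
      rcases (by omega : hi + 1 = (lo : Int) ∨ hi = (lo : Int)) with he | he
      · have hempty : (hi + 1).toNat = lo := by omega
        rw [hempty]
        refine ⟨[], ?_, by simp [segL], List.Pairwise.nil, by trivial⟩
        simp [List.take_append_drop]
      · have hlol : lo < L.length := by omega
        have hone : (hi + 1).toNat = lo + 1 := by omega
        rw [hone]
        refine ⟨[L[lo]], ?_, ?_, List.pairwise_singleton _ _, by trivial⟩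
        · conv_lhs => rw [← List.take_append_drop lo L, List.drop_eq_getElem_cons hlol]
          simp
        · rw [segL_head L lo (lo+1) (by omega) hlol, segL_nil]
    · rw [if_neg hc]
      push_neg at hc
      obtain ⟨hiN, rfl⟩ : ∃ n : Nat, hi = (n : Int) := ⟨hi.toNat, by omega⟩
      have hlohi : lo < hiN := by exact_mod_cast hc
      have hhilen : hiN < L.length := by exact_mod_cast h2
      rw [show (((hiN : Nat) : Int) + 1).toNat = hiN + 1 by omega]
      simp only [PySem.List.pyGetD_natCast]
      rw [show (((hiN : Nat) : Int) - (lo : Int)).toNat = hiN - lo by omega]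
      obtain ⟨L', i', eOut, c1, c2, clen, cH1, cH2, cperm, ctake, cdrop⟩ :=
        qsOuter_spec (hiN - lo) L lo lo hiN hiN (L.getD lo 0) le_rfl (by omega) le_rfl hhilen
          le_rfl (by intro k hk1 hk2; omega) (by intro k hk1 hk2; omega)
      rw [eOut]
      dsimp only
      simp only [Int.toNat_natCast]
      have hi'len : i' < L.length := by omega
      have hlol : lo < L.length := by omega
      set L2 := L'.set i' (L.getD lo 0) with hdefL2
      have hL2len : L2.length = L.length := by rw [hdefL2]; simp [clen]
      have hperm2 : (segL L2 lo (hiN+1)).Perm (segL L lo (hiN+1)) := by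
        have hp := cperm
        rw [set_getD_self L lo hlol] at hp
        exact hp
      have htake2 : L2.take lo = L.take lo := by
        rw [hdefL2, take_set_of_le _ _ _ _ (by omega), ctake]
      have hdrop2 : L2.drop (hiN+1) = L.drop (hiN+1) := by
        rw [hdefL2, drop_set_of_lt _ _ _ _ (by omega), cdrop]
      have hL2i' : L2.getD i' 0 = L.getD lo 0 := getD_set_self _ _ _ (by omega)
      -- first recursive call sorts [lo, i')
      obtain ⟨M1, r1eq, r1perm, r1sort, r1len⟩ :=
        ih L2 lo ((i' : Int) - 1) (by omega) (by rw [hL2len]; omega) (by omega)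
      rw [show (((i' : Int)) - 1 + 1).toNat = i' by omega] at r1eq r1perm
      set R1 := qs fuel L2 (lo : Int) ((i' : Int) - 1) with hdefR1
      have hR1len : R1.length = L.length := by rw [r1len, hL2len]
      have hM1len : M1.length = i' - lo := by
        rw [r1perm.length_eq, segL_len]
        omega
      have htakeloL2 : (L2.take lo).length = lo := by
        rw [List.length_take]
        omega
      have hR1drop : ∀ n, i' ≤ n → R1.drop n = L2.drop n := by
        intro n hn
        rw [r1eq, drop_append_gen, drop_append_gen]
        rw [List.drop_of_length_le (show (L2.take lo).length <= n by rw [htakeloL2]; omega)]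
        rw [List.drop_of_length_le (show M1.length <= n - (L2.take lo).length by rw [hM1len, htakeloL2]; omega)]
        simp only [List.nil_append, List.length_append, htakeloL2, hM1len]
        rw [List.drop_drop]
        congr 1
        omega
      -- second recursive call sorts (i', hiN]
      obtain ⟨M2, r2eq, r2perm, r2sort, r2len⟩ :=
        ih R1 (i' + 1) (((hiN : Nat) : Int)) (by omega) (by rw [hR1len]; exact_mod_cast h2)
          (by omega)
      rw [show (((hiN : Nat) : Int) + 1).toNat = hiN + 1 by omega] at r2eq r2perm
      rw [show ((i' : Int)) + 1 = (((i' + 1 : Nat)) : Int) by omega]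
      have hsegR1 : segL R1 (i'+1) (hiN+1) = segL L2 (i'+1) (hiN+1) := by
        unfold segL
        rw [hR1drop (i'+1) (by omega)]
      refine ⟨M1 ++ (L.getD lo 0) :: M2, ?_, ?_, ?_, ?_⟩
      · -- representation
        rw [r2eq]
        have htk : R1.take (i'+1) = L.take lo ++ M1 ++ [L.getD lo 0] := by
          rw [r1eq, take_append_gen, take_append_gen]
          rw [List.take_of_length_le (show (L2.take lo).length <= i' + 1 by rw [htakeloL2]; omega)]
          rw [List.take_of_length_le (show M1.length <= i' + 1 - (L2.take lo).length by rw [hM1len, htakeloL2]; omega)]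
          simp only [List.length_append, htakeloL2, hM1len]
          rw [show i' + 1 - (lo + (i' - lo)) = 1 by omega]
          rw [List.drop_eq_getElem_cons (show i' < L2.length by omega)]
          rw [List.take_succ_cons, List.take_zero]
          rw [show L2[i'] = L.getD lo 0 by
            rw [← List.getD_eq_getElem L2 0 (by omega)]; exact hL2i']
          rw [htake2]
        have hdr : R1.drop (hiN+1) = L.drop (hiN+1) := by
          rw [hR1drop (hiN+1) (by omega), hdrop2]
        rw [htk, hdr]
        simp [List.append_assoc]
      · -- permutation
        rw [hsegR1] at r2perm
        have hdecomp : segL L2 lo (hiN+1) = segL L2 lo i' ++ L2[i'] :: segL L2 (i'+1) (hiN+1) :=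
          segL_dec L2 lo i' (hiN+1) (by omega) (by omega) (by omega)
        have hL2i'' : L2[i'] = L.getD lo 0 := by
          rw [← List.getD_eq_getElem L2 0 (by omega)]; exact hL2i'
        have hp : (M1 ++ (L.getD lo 0) :: M2).Perm (segL L2 lo (hiN+1)) := by
          rw [hdecomp, hL2i'']
          exact r1perm.append (r2perm.cons _)
        exact hp.trans hperm2
      · -- sortedness
        rw [hsegR1] at r2perm
        apply List.pairwise_append.mpr
        refine ⟨r1sort, ?_, ?_⟩
        · apply List.pairwise_cons.mpr
          refine ⟨?_, r2sort⟩
          intro b hb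
          obtain ⟨k, hk1, hk2, hk3, hk4⟩ := segL_getD_mem _ _ _ _ (r2perm.mem_iff.mp hb)
          rw [← hk4, hdefL2, getD_set_ne _ _ _ _ (by omega)]
          exact cH2 k (by omega) (by omega)
        · intro a ha b hb
          obtain ⟨k, hk1, hk2, hk3, hk4⟩ := segL_getD_mem _ _ _ _ (r1perm.mem_iff.mp ha)
          have hak : a ≤ L.getD lo 0 := by
            rw [← hk4, hdefL2, getD_set_ne _ _ _ _ (by omega)]
            exact cH1 k hk1 hk2
          rcases List.mem_cons.mp hb with hbk | hbm
          · omega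
          · obtain ⟨m, hm1, hm2, hm3, hm4⟩ := segL_getD_mem _ _ _ _ (r2perm.mem_iff.mp hbm)
            have hbk : L.getD lo 0 ≤ b := by
              rw [← hm4, hdefL2, getD_set_ne _ _ _ _ (by omega)]
              exact cH2 m (by omega) (by omega)
            omega
      · -- length
        rw [r2len, hR1len]

theorem qs_eq_sorted (C : List Int) :
    qs C.length C 0 ((C.length : Int) - 1) = PySem.List.sorted C (fun x => x) false := by
  obtain ⟨M, hrep, hperm, hsort, _⟩ :=
    qs_spec C.length C (0 : Nat) ((C.length : Int) - 1) (by omega) (by omega) (by omega)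
  rw [show (((C.length : Int)) - 1 + 1).toNat = C.length by omega] at hrep hperm
  have hseg : segL C 0 C.length = C := by simp [segL]
  rw [hseg] at hperm
  simp only [Nat.cast_zero, List.take_zero, List.nil_append, List.drop_length,
    List.append_nil] at hrep
  rw [hrep]
  exact (PySem.List.sorted_id_eq_of_perm_of_pairwise C M hperm hsort).symm

-- ---------- greedy matching side ----------

theorem allM_cons (b : Int) (bs copy : List Int) :
    allM (b :: bs) copy = match copy.find? (fun j => decide (b < j)) with
      | some c => allM bs (copy.erase c)
      | none => false := rfl

theorem aLoop_eq_iff : ∀ (bs copy : List Int) (count : Int),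
    (aLoop bs copy count = count + bs.length ↔ allM bs copy = true) ∧
    aLoop bs copy count ≤ count + bs.length := by
  intro bs
  induction bs with
  | nil =>
    intro copy count
    constructor
    · simp [aLoop, allM]
    · simp [aLoop]
  | cons b bs ih =>
    intro copy count
    rw [aLoop, allM_cons]
    cases hf : copy.find? (fun j => decide (b < j)) with
    | none =>
      dsimp only
      have h2 := (ih copy count).2
      constructor
      · constructor
        · intro h
          exfalso
          rw [h] at h2
          simp only [List.length_cons] at h2
          push_cast at h2
          omega
        · intro h
          simp at h
      · simp only [List.length_cons]
        push_cast
        omega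
    | some c =>
      dsimp only
      have hmem : c ∈ copy := List.mem_of_find?_eq_some hf
      rw [PySem.List.remove?_eq_some_erase copy c hmem, Option.getD_some]
      have h1 := (ih (copy.erase c) (count + 1)).1
      have h2 := (ih (copy.erase c) (count + 1)).2
      have heq : count + 1 + ((bs.length : Nat) : Int) = count + (((b :: bs).length : Nat) : Int) := by
        simp only [List.length_cons]
        push_cast
        omega
      constructor
      · rw [← heq]
        exact h1
      · rw [heq] at h2
        exact h2

theorem find?_gt_none {b : Int} {l : List Int}
    (h : l.find? (fun j => decide (b < j)) = none) : ∀ e ∈ l, e ≤ b := by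
  intro e he
  have hx := List.find?_eq_none.mp h e he
  simpa using hx

theorem find?_gt_some {b : Int} : ∀ {l : List Int}, l.Pairwise (· ≤ ·) → ∀ {c : Int},
    l.find? (fun j => decide (b < j)) = some c →
    c ∈ l ∧ b < c ∧ ∀ e ∈ l, b < e → c ≤ e := by
  intro l
  induction l with
  | nil => intro _ c h; cases h
  | cons x l ih =>
    intro hs c h
    by_cases hx : b < x
    · rw [List.find?_cons_of_pos (by simpa using hx)] at h
      injection h with h
      subst h
      refine ⟨by simp, hx, ?_⟩
      intro e he _
      rcases List.mem_cons.mp he with he | he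
      · omega
      · exact (List.pairwise_cons.mp hs).1 e he
    · rw [List.find?_cons_of_neg (by simpa using hx)] at h
      obtain ⟨h1, h2, h3⟩ := ih (List.pairwise_cons.mp hs).2 h
      refine ⟨List.mem_cons_of_mem _ h1, h2, ?_⟩
      intro e he hbe
      rcases List.mem_cons.mp he with he | he
      · subst he; omega
      · exact h3 e he hbe

theorem find?_gt_eq_some {b : Int} : ∀ {l : List Int}, l.Pairwise (· ≤ ·) → ∀ {c : Int},
    c ∈ l → b < c → (∀ e ∈ l, b < e → c ≤ e) →
    l.find? (fun j => decide (b < j)) = some c := by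
  intro l
  induction l with
  | nil => intro _ c hc; cases hc
  | cons x l ih =>
    intro hs c hc hbc hmin
    by_cases hx : b < x
    · have h1 : c ≤ x := hmin x (by simp) hx
      have h2 : x ≤ c := by
        rcases List.mem_cons.mp hc with hc | hc
        · omega
        · exact (List.pairwise_cons.mp hs).1 c hc
      rw [List.find?_cons_of_pos (by simpa using hx)]
      have : x = c := by omega
      rw [this]
    · have hcx : c ≠ x := by intro he; subst he; exact hx hbc
      have hcl : c ∈ l := by
        rcases List.mem_cons.mp hc with hc | hc
        · exact absurd hc hcx
        · exact hc
      rw [List.find?_cons_of_neg (by simpa using hx)]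
      exact ih (List.pairwise_cons.mp hs).2 hcl hbc
        (fun e he hbe => hmin e (List.mem_cons_of_mem _ he) hbe)

theorem find?_congr' {p q : Int → Bool} : ∀ {l : List Int}, (∀ e ∈ l, p e = q e) →
    l.find? p = l.find? q := by
  intro l
  induction l with
  | nil => intro _; rfl
  | cons x l ih =>
    intro h
    by_cases hqx : q x = true
    · rw [List.find?_cons_of_pos (by rw [h x (by simp)]; exact hqx),
        List.find?_cons_of_pos hqx]
    · rw [List.find?_cons_of_neg (by rw [h x (by simp)]; exact hqx),
        List.find?_cons_of_neg hqx]
      exact ih fun e he => h e (List.mem_cons_of_mem _ he)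

theorem allM_swap {x y : Int} (hxy : x ≤ y) (l : List Int) : ∀ (copy : List Int),
    copy.Pairwise (· ≤ ·) → allM (x :: y :: l) copy = allM (y :: x :: l) copy := by
  intro copy hs
  rw [allM_cons x (y :: l) copy, allM_cons y (x :: l) copy]
  cases hy : copy.find? (fun j => decide (y < j)) with
  | none =>
    cases hx : copy.find? (fun j => decide (x < j)) with
    | none => rfl
    | some cx =>
      simp only
      rw [allM_cons y l (copy.erase cx)]
      have hnone : (copy.erase cx).find? (fun j => decide (y < j)) = none := by
        apply List.find?_eq_none.mpr
        intro e he
        have he' := find?_gt_none hy e (List.erase_subset he)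
        simpa using he'
      rw [hnone]
  | some cy =>
    obtain ⟨hcy_mem, hcy_gt, hcy_min⟩ := find?_gt_some hs hy
    cases hx : copy.find? (fun j => decide (x < j)) with
    | none =>
      exfalso
      have hle := find?_gt_none hx cy hcy_mem
      omega
    | some cx =>
      obtain ⟨hcx_mem, hcx_gt, hcx_min⟩ := find?_gt_some hs hx
      have hcxcy : cx ≤ cy := hcx_min cy hcy_mem (by omega)
      simp only
      rw [allM_cons y l (copy.erase cx), allM_cons x l (copy.erase cy)]
      rcases eq_or_lt_of_le hcxcy with heq | hlt
      · -- same minimum: the two predicates agree on all of copy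
        subst heq
        have hagree : ∀ e ∈ copy, (fun j => decide (x < j)) e = (fun j => decide (y < j)) e := by
          intro e he
          simp only [decide_eq_decide]
          constructor
          · intro hxe
            have := hcx_min e he hxe
            omega
          · intro hye
            omega
        have hect : (copy.erase cx).find? (fun j => decide (y < j))
            = (copy.erase cx).find? (fun j => decide (x < j)) :=
          find?_congr' (fun e he => (hagree e (List.erase_subset he)).symm)
        rw [hect]
      · -- distinct minima: both orders remove the same two elements
        have hcxy : cx ≤ y := by
          by_contra hcon
          push_neg at hcon
          have := hcy_min cx hcx_mem hcon
          omega
        have h1 : (copy.erase cx).find? (fun j => decide (y < j)) = some cy := by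
          apply find?_gt_eq_some (List.Pairwise.sublist (List.erase_sublist) hs)
          · exact (List.mem_erase_of_ne (by omega)).mpr hcy_mem
          · exact hcy_gt
          · intro e he hbe
            exact hcy_min e (List.erase_subset he) hbe
        have h2 : (copy.erase cy).find? (fun j => decide (x < j)) = some cx := by
          apply find?_gt_eq_some (List.Pairwise.sublist (List.erase_sublist) hs)
          · exact (List.mem_erase_of_ne (by omega)).mpr hcx_mem
          · exact hcx_gt
          · intro e he hbe
            exact hcx_min e (List.erase_subset he) hbe
        rw [h1, h2]
        show allM l ((copy.erase cx).erase cy) = allM l ((copy.erase cy).erase cx)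
        rw [List.erase_comm]

theorem allM_perm : ∀ {bs bs' : List Int}, bs.Perm bs' → ∀ copy, copy.Pairwise (· ≤ ·) →
    allM bs copy = allM bs' copy := by
  intro bs bs' h
  induction h with
  | nil => intro copy _; rfl
  | cons x h ih =>
    intro copy hs
    rw [allM_cons, allM_cons]
    cases hf : copy.find? (fun j => decide (x < j)) with
    | none => rfl
    | some c => exact ih _ (List.Pairwise.sublist (List.erase_sublist) hs)
  | swap x y l =>
    intro copy hs
    rcases le_total y x with hxy | hxy
    · exact allM_swap hxy l copy hs
    · exact (allM_swap hxy l copy hs).symm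
  | trans h1 h2 ih1 ih2 =>
    intro copy hs
    exact (ih1 copy hs).trans (ih2 copy hs)

theorem allM_unmatchable : ∀ (bs copy : List Int) (e : Int), e ∈ copy → (∀ b ∈ bs, e ≤ b) →
    copy.length = bs.length → allM bs copy = false := by
  intro bs
  induction bs with
  | nil =>
    intro copy e he _ hlen
    rw [List.length_nil, List.length_eq_zero_iff] at hlen
    subst hlen
    cases he
  | cons b bs ih =>
    intro copy e he hb hlen
    rw [allM_cons]
    cases hf : copy.find? (fun j => decide (b < j)) with
    | none => rfl
    | some c =>
      simp only
      have hcmem := List.mem_of_find?_eq_some hf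
      have hcgt : b < c := by
        have hp := List.find?_some hf
        simpa using hp
      have hec : e ≠ c := by
        have : e ≤ b := hb b (by simp)
        omega
      apply ih (copy.erase c) e ((List.mem_erase_of_ne hec).mpr he)
        (fun b' hb' => hb b' (List.mem_cons_of_mem _ hb'))
      rw [List.length_erase_of_mem hcmem]
      simp only [List.length_cons] at hlen
      have : 1 ≤ copy.length := List.length_pos_of_mem hcmem
      omega

theorem allM_sorted_eq : ∀ (bs cs : List Int), bs.Pairwise (· ≤ ·) → cs.Pairwise (· ≤ ·) →
    bs.length = cs.length → allM bs cs = domBy cs bs := by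
  intro bs
  induction bs with
  | nil =>
    intro cs _ _ hlen
    rw [List.length_nil] at hlen
    have : cs = [] := List.length_eq_zero_iff.mp hlen.symm
    subst this
    simp [allM, domBy]
  | cons b bs ih =>
    intro cs hbs hcs hlen
    cases cs with
    | nil => simp at hlen
    | cons c cs =>
      by_cases hbc : b < c
      · rw [allM_cons]
        rw [List.find?_cons_of_pos (by simpa using hbc)]
        simp only [List.erase_cons_head]
        rw [ih cs (List.pairwise_cons.mp hbs).2 (List.pairwise_cons.mp hcs).2
          (by simpa using hlen)]
        simp [domBy, hbc]
      · have h1 : domBy (c :: cs) (b :: bs) = false := by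
          simp [domBy, hbc]
        rw [h1]
        apply allM_unmatchable (b :: bs) (c :: cs) c (by simp) ?_ (by simpa using hlen.symm)
        intro b' hb'
        rcases List.mem_cons.mp hb' with hb' | hb'
        · omega
        · have := (List.pairwise_cons.mp hbs).1 b' hb'
          omega

theorem count_full_iff (B C : List Int) (h : B.length = C.length) :
    (aLoop B (PySem.List.sorted C (fun x => x) false) 0 = (B.length : Int)) ↔
      domBy (PySem.List.sorted C (fun x => x) false)
        (PySem.List.sorted B (fun x => x) false) = true := by
  have hpw_c : (PySem.List.sorted C (fun x => x) false).Pairwise (· ≤ ·) := by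
    have hp := PySem.List.sorted_pairwise C (fun x => x)
    simpa using hp
  have hpw_b : (PySem.List.sorted B (fun x => x) false).Pairwise (· ≤ ·) := by
    have hp := PySem.List.sorted_pairwise B (fun x => x)
    simpa using hp
  have hperm_b : B.Perm (PySem.List.sorted B (fun x => x) false) :=
    (PySem.List.sorted_perm B (fun x => x) false).symm
  have hlen : (PySem.List.sorted B (fun x => x) false).length
      = (PySem.List.sorted C (fun x => x) false).length := by
    rw [PySem.List.length_sorted, PySem.List.length_sorted, h]
  have h1 := (aLoop_eq_iff B (PySem.List.sorted C (fun x => x) false) 0).1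
  rw [zero_add] at h1
  rw [h1]
  rw [allM_perm hperm_b _ hpw_c]
  rw [allM_sorted_eq _ _ hpw_b hpw_c hlen]

-- ===== VERDICT (by name: the statement is the Claim_ definition above) =====
theorem undsub_spec : Claim_equal_undsub := by
  intro setp _ hpre
  unfold Spec_undsub
  rcases setp with _ | ⟨B, t⟩
  · exact absurd hpre (by simp [Pre_undsub])
  rcases t with _ | ⟨C, rest⟩
  · exact absurd hpre (by simp [Pre_undsub])
  unfold undsub undsub_alt
  have e1 : PySem.List.pyGet? (B :: C :: rest) 1 = some C := by
    rw [show (1 : Int) = ((0 : Nat) : Int) + 1 by norm_num, PySem.List.pyGet?_cons_succ]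
    simp
  simp only [PySem.List.pyGet?_zero_cons, e1, Option.getD_some]
  by_cases hlen : B.length = C.length
  · by_cases h1 : B.length = 1
    · have h1' : C.length = 1 := by omega
      simp [hlen, h1']
    · have h1' : ¬ C.length = 1 := by omega
      have hA1 : ¬ ((B.length : Int) ≠ (C.length : Int)) := by
        simp [hlen]
      have hA2 : ¬ ((B.length : Int) = 1) := by
        exact_mod_cast h1
      rw [if_neg hA1, if_neg hA2]
      rw [qs_eq_sorted C, qs_eq_sorted B]
      have hiff1 := count_full_iff B C hlen
      have hiff2 := count_full_iff C B hlen.symm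
      by_cases hd1 : domBy (PySem.List.sorted C (fun x => x) false)
          (PySem.List.sorted B (fun x => x) false) = true
      · rw [if_pos (hiff1.mpr hd1)]
        simp [hlen, h1', hd1]
      · have hne1 : aLoop B (PySem.List.sorted C (fun x => x) false) 0 ≠ (B.length : Int) :=
          fun hh => hd1 (hiff1.mp hh)
        rw [if_neg hne1]
        have hd1' : domBy (PySem.List.sorted C (fun x => x) false)
            (PySem.List.sorted B (fun x => x) false) = false := by
          rcases Bool.eq_false_or_eq_true (domBy (PySem.List.sorted C (fun x => x) false)
            (PySem.List.sorted B (fun x => x) false)) with hh | hh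
          · exact absurd hh hd1
          · exact hh
        by_cases hd2 : domBy (PySem.List.sorted B (fun x => x) false)
            (PySem.List.sorted C (fun x => x) false) = true
        · rw [if_pos (hiff2.mpr hd2)]
          simp [hlen, h1', hd2]
        · have hne2 : aLoop C (PySem.List.sorted B (fun x => x) false) 0 ≠ (C.length : Int) :=
            fun hh => hd2 (hiff2.mp hh)
          rw [if_neg hne2]
          have hd2' : domBy (PySem.List.sorted B (fun x => x) false)
              (PySem.List.sorted C (fun x => x) false) = false := by
            rcases Bool.eq_false_or_eq_true (domBy (PySem.List.sorted B (fun x => x) false)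
              (PySem.List.sorted C (fun x => x) false)) with hh | hh
            · exact absurd hh hd2
            · exact hh
          simp [hlen, h1', hd1', hd2']
  · have hA : ((B.length : Int) ≠ (C.length : Int)) := by
      exact_mod_cast hlen
    rw [if_pos hA]
    simp [hlen]
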